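-- pv_equiv track=rewrite | github.com/MoCoMakers/streamlit-demo | utils.py | invert_hex_color
-- ===== SOURCE A (Python) =====
-- def invert_hex_color(content):
--     text = content.lower()
--     code = {}
--     l1 = "#;0123456789abcdef"
--     l2 = "#;fedcba9876543210"
--     for i in range(len(l1)):
--         code[l1[i]] = l2[i]
--     inverted = ""
--     for j in text:
--         inverted += code[j]
--     return inverted
-- ===== SOURCE B (Python) =====
-- def invert_hex_color(content):
--     out = []
--     for c in content.lower():
--         if c in '#;':
--             out.append(c)
--         else:
--             out.append(format(15 - int(c, 16), 'x'))
--     return ''.join(out)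
-- ===== Notes on version B (the rewrite author's own statement) =====
-- stated objective: idiomatic
-- what changed: B drops A's loop-built substitution dict and instead maps each character of the lowercased input arithmetically: punctuation passes through unchanged and each hex digit is replaced by fifteen minus its value, rendered back as a hex digit.
import Mathlib
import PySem

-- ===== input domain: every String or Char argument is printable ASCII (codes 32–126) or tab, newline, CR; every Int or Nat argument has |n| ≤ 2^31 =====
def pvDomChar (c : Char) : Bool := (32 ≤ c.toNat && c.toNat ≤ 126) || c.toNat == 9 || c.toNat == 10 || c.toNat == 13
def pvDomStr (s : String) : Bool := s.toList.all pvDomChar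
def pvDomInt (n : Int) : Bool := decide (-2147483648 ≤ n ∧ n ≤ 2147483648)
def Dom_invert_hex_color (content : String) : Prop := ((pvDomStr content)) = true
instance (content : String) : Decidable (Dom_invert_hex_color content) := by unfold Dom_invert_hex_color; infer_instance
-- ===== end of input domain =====

-- B drops A's loop-built substitution dict and maps each character arithmetically instead:
-- idiomatic, same cost. Equivalence on Pre_ (inputs where A does not raise KeyError).

-- ===== PORT A =====
def invert_hex_color (content : String) : String :=
  let text := PySem.Str.lower content
  let l1 : String := "#;0123456789abcdef"
  let l2 : String := "#;fedcba9876543210"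
  let code : PySem.Dict Char Char :=
    (PySem.List.pyRange 0 (PySem.Str.len l1) 1).foldl
      (fun d i =>
        match PySem.Str.pyGet? l1 i, PySem.Str.pyGet? l2 i with
        | some a, some b => d.insert a b
        | _, _ => d)  -- unreachable: i is in range (Python would raise IndexError)
      PySem.Dict.empty
  -- code[j]: a missing key is a Python KeyError, excluded by Pre_; '?' is a dummy there
  text.toList.foldl (fun acc j => acc ++ String.ofList [(code.get? j).getD '?']) ""

-- ===== PORT B =====
-- each hex digit becomes fifteen minus its value, rendered back as a lowercase hex digit
def pvInvChar (c : Char) : Char :=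
  if c = '#' ∨ c = ';' then c
  else
    let v : Nat := if c.toNat ≤ 57 then c.toNat - 48 else c.toNat - 87
    let w : Nat := 15 - v
    if w < 10 then Char.ofNat (48 + w) else Char.ofNat (87 + w)

def invert_hex_color_alt (content : String) : String :=
  String.ofList ((PySem.Str.lower content).toList.map pvInvChar)

-- ===== PRECONDITION & SPEC =====
-- Pre_ excludes exactly the inputs on which A raises KeyError: a character of the lowercased
-- input outside A's substitution alphabet (B raises ValueError there).
def pvAllowed : List Char := ['#',';','0','1','2','3','4','5','6','7','8','9','a','b','c','d','e','f']
def Pre_invert_hex_color (content : String) : Prop :=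
  ((PySem.Str.lower content).toList.all (fun c => c ∈ pvAllowed)) = true
instance (content : String) : Decidable (Pre_invert_hex_color content) := by
  unfold Pre_invert_hex_color; infer_instance

def pvWitness_invert_hex_color : String := "#1a2B3c;"

def Spec_invert_hex_color (content : String) (out : String) : Prop := out = invert_hex_color_alt content
instance (content : String) (out : String) : Decidable (Spec_invert_hex_color content out) := by unfold Spec_invert_hex_color; infer_instance

-- ===== CLAIM (what is proved, stated in full; the proofs are below) =====
def Claim_equal_invert_hex_color : Prop := ∀ (content : String), Dom_invert_hex_color content → Pre_invert_hex_color content → Spec_invert_hex_color content (invert_hex_color content)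

-- ===== LEMMAS AND PROOFS =====

-- A's dict lookup agrees with B's arithmetic on every admitted character (18 cases, by decide).
theorem pv_lookup_eq (c : Char) (h : c ∈ pvAllowed) :
    (((PySem.List.pyRange 0 (PySem.Str.len "#;0123456789abcdef") 1).foldl
      (fun d i =>
        match PySem.Str.pyGet? "#;0123456789abcdef" i, PySem.Str.pyGet? "#;fedcba9876543210" i with
        | some a, some b => d.insert a b
        | _, _ => d)
      PySem.Dict.empty).get? c).getD '?' = pvInvChar c := by
  fin_cases h <;> decide

-- A's append-fold equals s ++ the mapped list, given per-character agreement on the list's members.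
theorem pv_fold_eq (f g : Char → Char) (l : List Char) (s : String)
    (h : ∀ c ∈ l, f c = g c) :
    (l.foldl (fun acc j => acc ++ String.ofList [f j]) s).toList = s.toList ++ l.map g := by
  induction l generalizing s with
  | nil => simp
  | cons x xs ih =>
      simp only [List.foldl_cons, List.map_cons]
      rw [ih _ (fun c hc => h c (List.mem_cons_of_mem _ hc)), h x (List.mem_cons_self)]
      simp

-- ===== VERDICT (by name: the statement is the Claim_ definition above) =====
theorem invert_hex_color_spec : Claim_equal_invert_hex_color := by
  intro content _ hpre
  unfold Pre_invert_hex_color at hpre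
  unfold Spec_invert_hex_color invert_hex_color invert_hex_color_alt
  simp only []
  have h : ∀ c ∈ (PySem.Str.lower content).toList, c ∈ pvAllowed := by
    intro c hc
    exact of_decide_eq_true (List.all_eq_true.mp hpre c hc)
  apply String.toList_injective
  rw [pv_fold_eq _ pvInvChar _ _ (fun c hc => pv_lookup_eq c (h c hc))]
  simp
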